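-- pv_equiv track=rewrite | github.com/acudovs/powergslb | src/powergslb/server/http/handler/queryparser.py | _more_than_one_index
-- ===== SOURCE A (Python) =====
-- def _more_than_one_index(s, brackets=2):
--     """
--     Search for two sets of [] []
--     @param s: string
--     @param brackets: int
--     """
--     start = 0
--     brackets_num = 0
--     while start != -1 and brackets_num < brackets:
--         start = s.find('[', start)
--         if start == -1:
--             break
--         start = s.find(']', start)
--         brackets_num += 1
--     if start != -1:
--         return True
--     return False
-- ===== SOURCE B (Python) =====
-- import re
--
-- _PAIR_RE = re.compile(r'\[[\s\S]*?\]')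
--
--
-- def _more_than_one_index(s, brackets=2):
--     """Count non-overlapping minimal [...] spans with a regex and compare."""
--     return len(_PAIR_RE.findall(s)) >= brackets
-- ===== Notes on version B (the rewrite author's own statement) =====
-- stated objective: idiomatic
-- what changed: A's hand-rolled while loop that jumps between str.find('[') and str.find(']') is replaced by counting the regex engine's non-overlapping lazy [...] matches (re.findall(r'\[[\s\S]*?\]', s)) and comparing that count with the threshold.
import Mathlib
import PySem

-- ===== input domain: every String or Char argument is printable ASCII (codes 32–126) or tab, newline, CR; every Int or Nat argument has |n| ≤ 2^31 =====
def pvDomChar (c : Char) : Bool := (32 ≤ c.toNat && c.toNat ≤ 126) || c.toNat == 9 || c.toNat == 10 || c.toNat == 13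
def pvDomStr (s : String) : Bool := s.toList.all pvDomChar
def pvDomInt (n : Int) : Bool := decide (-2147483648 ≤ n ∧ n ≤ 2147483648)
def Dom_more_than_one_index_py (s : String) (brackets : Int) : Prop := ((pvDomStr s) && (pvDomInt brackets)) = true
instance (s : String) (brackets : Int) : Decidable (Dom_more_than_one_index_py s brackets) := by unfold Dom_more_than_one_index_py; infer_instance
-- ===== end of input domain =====

-- B replaces A's find-jumping while loop by counting the regex engine's non-overlapping lazy [...] matches and comparing the count: alternative decomposition, same cost.


-- ===== PORT A =====
-- the while loop of A: state (start, brackets_num); returns the final value of start.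
-- 'start = s.find('[', start)' / 'start = s.find(']', start)' are PySem.Chars.findFrom (exact).
def pvLoopA (s : List Char) (brackets : Int) (start num : Int) : Int :=
  if start ≠ -1 ∧ num < brackets then
    if PySem.Chars.findFrom s ['['] start = -1 then -1      -- break with start = -1
    else pvLoopA s brackets
      (PySem.Chars.findFrom s [']'] (PySem.Chars.findFrom s ['['] start)) (num + 1)
  else start

termination_by (brackets - num).toNat
decreasing_by omega

def more_than_one_index_py (s : String) (brackets : Int) : Bool :=
  let r := pvLoopA s.toList brackets 0 0
  if r ≠ -1 then true else false

-- ===== PORT B =====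
-- re.findall(r'\[[\s\S]*?\]', s) yields the non-overlapping leftmost lazy [...] spans;
-- its match COUNT is ported exactly as the regex engine's two-state left-to-right scan.
mutual
  def pvCountOut : List Char → Nat                 -- not inside a '[' yet
    | [] => 0
    | c :: rest => if c = '[' then pvCountIn rest else pvCountOut rest
  def pvCountIn : List Char → Nat                  -- seen '[', lazily looking for ']'
    | [] => 0
    | c :: rest => if c = ']' then pvCountOut rest + 1 else pvCountIn rest
end

def more_than_one_index_py_alt (s : String) (brackets : Int) : Bool :=
  decide (brackets ≤ (pvCountOut s.toList : Int))

-- ===== PRECONDITION & SPEC =====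
def Spec_more_than_one_index_py (s : String) (brackets : Int) (out : Bool) : Prop := out = more_than_one_index_py_alt s brackets
instance (s : String) (brackets : Int) (out : Bool) : Decidable (Spec_more_than_one_index_py s brackets out) := by unfold Spec_more_than_one_index_py; infer_instance

-- ===== CLAIM (what is proved, stated in full; the proofs are below) =====
def Claim_equal_more_than_one_index_py : Prop := ∀ (s : String) (brackets : Int), Dom_more_than_one_index_py s brackets → Spec_more_than_one_index_py s brackets (more_than_one_index_py s brackets)

-- ===== LEMMAS AND PROOFS =====

-- a singleton list is a prefix of l iff l starts with that character
lemma single_prefix {c : Char} {l : List Char} : [c] <+: l ↔ ∃ t, l = c :: t := by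
  constructor
  · rintro ⟨t, rfl⟩; exact ⟨t, rfl⟩
  · rintro ⟨t, rfl⟩; exact ⟨t, rfl⟩

lemma single_infix_of_mem {c : Char} {l : List Char} (h : c ∈ l) : [c] <:+: l := by
  obtain ⟨l1, l2, rfl⟩ := List.append_of_mem h
  exact ⟨l1, l2, by simp⟩

lemma countOut_no_open {l : List Char} (h : '[' ∉ l) : pvCountOut l = 0 := by
  induction l with
  | nil => rfl
  | cons c rest ih =>
    simp only [List.mem_cons, not_or] at h
    simp [pvCountOut, Ne.symm h.1, ih h.2]

lemma countIn_no_close {l : List Char} (h : ']' ∉ l) : pvCountIn l = 0 := by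
  induction l with
  | nil => rfl
  | cons c rest ih =>
    simp only [List.mem_cons, not_or] at h
    simp [pvCountIn, Ne.symm h.1, ih h.2]

lemma countOut_append_no_open {l1 l2 : List Char} (h : '[' ∉ l1) :
    pvCountOut (l1 ++ l2) = pvCountOut l2 := by
  induction l1 with
  | nil => rfl
  | cons c rest ih =>
    simp only [List.mem_cons, not_or] at h
    simp [pvCountOut, Ne.symm h.1, ih h.2]

lemma countIn_append_no_close {l1 l2 : List Char} (h : ']' ∉ l1) :
    pvCountIn (l1 ++ l2) = pvCountIn l2 := by
  induction l1 with
  | nil => rfl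
  | cons c rest ih =>
    simp only [List.mem_cons, not_or] at h
    simp [pvCountIn, Ne.symm h.1, ih h.2]

-- the searched character does not occur before the position find returns
lemma no_char_before_find {s : List Char} {c : Char} (h : 0 ≤ PySem.Chars.find s [c]) :
    c ∉ s.take (PySem.Chars.find s [c]).toNat := by
  intro hmem
  obtain ⟨i, hi, hget⟩ := List.getElem_of_mem hmem
  have hlen : (s.take (PySem.Chars.find s [c]).toNat).length
      = min (PySem.Chars.find s [c]).toNat s.length := by rw [List.length_take]
  have hlt : i < (PySem.Chars.find s [c]).toNat := by omega
  have hsl : i < s.length := by omega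
  apply (PySem.Chars.find_spec h).2 i hlt
  rw [single_prefix]
  refine ⟨s.drop (i + 1), ?_⟩
  rw [List.drop_eq_getElem_cons hsl]
  rw [List.getElem_take] at hget
  rw [hget]

-- find of a singleton at a nonnegative result: the char is there and not earlier
lemma find_single_decomp {s : List Char} {c : Char} (h : 0 ≤ PySem.Chars.find s [c]) :
    ∃ t, s = s.take (PySem.Chars.find s [c]).toNat ++ c :: t ∧
      c ∉ s.take (PySem.Chars.find s [c]).toNat := by
  have hfs := PySem.Chars.find_spec h
  obtain ⟨t, ht⟩ := single_prefix.mp hfs.1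
  refine ⟨t, ?_, no_char_before_find h⟩
  conv_lhs => rw [← List.take_append_drop (PySem.Chars.find s [c]).toNat s]
  rw [ht]

-- main invariant: the while loop from a valid index k with counter num escapes -1
-- exactly when the scan count of the suffix makes up the remaining brackets
lemma loop_iff (s : List Char) (brackets : Int) :
    ∀ (fuel : Nat) (num : Int), fuel = (brackets - num).toNat →
    ∀ (k : Nat), k ≤ s.length →
      (pvLoopA s brackets (k : Int) num ≠ -1 ↔ brackets ≤ num + pvCountOut (s.drop k)) := by
  intro fuel
  induction fuel with
  | zero =>
    intro num hfuel k hk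
    rw [pvLoopA]
    have hcond : ¬ ((k : Int) ≠ -1 ∧ num < brackets) := by omega
    rw [if_neg hcond]
    constructor
    · intro _
      have : (0:Int) ≤ pvCountOut (s.drop k) := Int.natCast_nonneg _
      omega
    · intro _; omega
  | succ n ih =>
    intro num hfuel k hk
    have hnb : num < brackets := by omega
    rw [pvLoopA, if_pos ⟨by omega, hnb⟩]
    by_cases h1 : PySem.Chars.find (s.drop k) ['['] = -1
    · -- no '[' in the suffix: the loop breaks with start = -1; the scan count is 0
      rw [if_pos (show PySem.Chars.findFrom s ['['] (k : Int) = -1 by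
        rw [PySem.Chars.findFrom_natCast s ['['] k hk, if_pos h1])]
      have hnomem : '[' ∉ s.drop k := fun hm =>
        (PySem.Chars.find_eq_neg_one_iff _ _).mp h1 (single_infix_of_mem hm)
      rw [countOut_no_open hnomem]
      constructor
      · intro hcontra; exact absurd rfl hcontra
      · intro hle; exfalso; omega
    · -- '[' found at k + jn
      have hjge : 0 ≤ PySem.Chars.find (s.drop k) ['['] := by
        have := PySem.Chars.neg_one_le_find (s.drop k) ['[']; omega
      set jn := (PySem.Chars.find (s.drop k) ['[']).toNat with hjn
      have hjcast : PySem.Chars.find (s.drop k) ['['] = (jn : Int) :=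
        (Int.toNat_of_nonneg hjge).symm
      have hfind1 : PySem.Chars.findFrom s ['['] (k : Int) = ((k + jn : Nat) : Int) := by
        rw [PySem.Chars.findFrom_natCast s ['['] k hk, if_neg h1, hjcast]
        push_cast; ring
      rw [if_neg (by rw [hfind1]; omega), hfind1]
      obtain ⟨t, hdecomp, hnotm⟩ := find_single_decomp (s := s.drop k) (c := '[') hjge
      have hdl : (s.drop k).length = s.length - k := by simp
      have hjle : jn ≤ (s.drop k).length := by
        have := PySem.Chars.find_le_length (s.drop k) ['[']; omega
      have htl : ((s.drop k).take jn).length = jn := by rw [List.length_take]; omega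
      have hLL := congrArg List.length hdecomp
      rw [List.length_append, htl, List.length_cons] at hLL
      have hkj_lt : k + jn < s.length := by omega
      have hdd : s.drop (k + jn) = '[' :: t := by
        rw [← List.drop_drop]
        conv_lhs => rw [hdecomp]
        rw [List.drop_left' htl]
      have hcount1 : pvCountOut (s.drop k) = pvCountIn t := by
        rw [hdecomp, countOut_append_no_open hnotm]; simp [pvCountOut]
      by_cases h2 : PySem.Chars.find (s.drop (k + jn)) [']'] = -1
      · -- no ']' after that '[': the loop recurses with start = -1 and returns -1
        have hfind2 : PySem.Chars.findFrom s [']'] ((k + jn : Nat) : Int) = -1 := by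
          rw [PySem.Chars.findFrom_natCast s [']'] (k + jn) (by omega), if_pos h2]
        rw [hfind2, pvLoopA, if_neg (by omega)]
        have hnomem2 : ']' ∉ s.drop (k + jn) := fun hm =>
          (PySem.Chars.find_eq_neg_one_iff _ _).mp h2 (single_infix_of_mem hm)
        rw [hdd] at hnomem2
        have htno : ']' ∉ t := fun hm => hnomem2 (List.mem_cons_of_mem _ hm)
        rw [hcount1, countIn_no_close htno]
        constructor
        · intro hcontra; exact absurd rfl hcontra
        · intro hle; exfalso; omega
      · -- ']' found at k + jn + mn: one full pair; recurse from that ']'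
        have hmge : 0 ≤ PySem.Chars.find (s.drop (k + jn)) [']'] := by
          have := PySem.Chars.neg_one_le_find (s.drop (k + jn)) [']']; omega
        set mn := (PySem.Chars.find (s.drop (k + jn)) [']']).toNat with hmn
        have hmcast : PySem.Chars.find (s.drop (k + jn)) [']'] = (mn : Int) :=
          (Int.toNat_of_nonneg hmge).symm
        have hfind2 : PySem.Chars.findFrom s [']'] ((k + jn : Nat) : Int)
            = ((k + jn + mn : Nat) : Int) := by
          rw [PySem.Chars.findFrom_natCast s [']'] (k + jn) (by omega), if_neg h2, hmcast]
          push_cast; ring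
        rw [hfind2]
        obtain ⟨u, hdecomp2, hnotm2⟩ := find_single_decomp (s := s.drop (k + jn)) (c := ']') hmge
        have hdl2 : (s.drop (k + jn)).length = s.length - (k + jn) := by simp
        have hmle : mn ≤ (s.drop (k + jn)).length := by
          have := PySem.Chars.find_le_length (s.drop (k + jn)) [']']; omega
        have htl2 : ((s.drop (k + jn)).take mn).length = mn := by rw [List.length_take]; omega
        have hLL2 := congrArg List.length hdecomp2
        rw [List.length_append, htl2, List.length_cons] at hLL2
        have hkjm_lt : k + jn + mn < s.length := by omega
        have hdd2 : s.drop (k + jn + mn) = ']' :: u := by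
          rw [← List.drop_drop]
          conv_lhs => rw [hdecomp2]
          rw [List.drop_left' htl2]
        have hm1 : 1 ≤ mn := by
          by_contra hc
          have hme : (PySem.Chars.find (s.drop (k + jn)) [']']).toNat = 0 := by omega
          rw [hme] at hdecomp2
          simp at hdecomp2
          rw [hdd] at hdecomp2
          simp at hdecomp2
        have htake : (s.drop (k + jn)).take mn = '[' :: t.take (mn - 1) := by
          rw [hdd]
          obtain ⟨m', hm'⟩ : ∃ m', mn = m' + 1 := ⟨mn - 1, by omega⟩
          rw [hm']
          simp [List.take_succ_cons]
        have ht_decomp : t = t.take (mn - 1) ++ ']' :: u := by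
          have h3 : '[' :: t = (s.drop (k + jn)).take mn ++ ']' :: u := by
            rw [← hdd]; exact hdecomp2
          rw [htake] at h3
          simpa using h3
        have hno_close_seg : ']' ∉ t.take (mn - 1) := by
          intro hmem
          apply hnotm2
          rw [htake]
          exact List.mem_cons_of_mem _ hmem
        have hcount2 : pvCountIn t = pvCountOut u + 1 := by
          conv_lhs => rw [ht_decomp]
          rw [countIn_append_no_close hno_close_seg]
          simp [pvCountIn]
        rw [ih (num + 1) (by omega) (k + jn + mn) (by omega), hdd2, hcount1, hcount2]
        have hco : pvCountOut (']' :: u) = pvCountOut u := by simp [pvCountOut]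
        rw [hco]
        push_cast
        omega

-- ===== VERDICT (by name: the statement is the Claim_ definition above) =====
theorem more_than_one_index_py_spec : Claim_equal_more_than_one_index_py := by
  intro s brackets _
  unfold Spec_more_than_one_index_py more_than_one_index_py more_than_one_index_py_alt
  have h := loop_iff s.toList brackets (brackets - 0).toNat 0 rfl 0 (by omega)
  simp only [List.drop_zero, Nat.cast_zero, zero_add] at h
  by_cases hc : brackets ≤ (pvCountOut s.toList : Int)
  · simp [h.mpr hc, hc]
  · have hEq : pvLoopA s.toList brackets 0 0 = -1 := by
      by_contra hne; exact hc (h.mp hne)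
    simp [hEq, hc]
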